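-- pv_equiv track=rewrite | github.com/aelsheikh-reno/workload_planner | services/review_approval_service/service.py | _walk_delta_component
-- ===== SOURCE A (Python) =====
-- from typing import Dict, Iterable, List, Optional, Set, Tuple
--
-- def _walk_delta_component(
--     adjacency: Dict[str, Set[str]],
--     start_delta_id: str,
-- ) -> List[str]:
--     component_delta_ids: Set[str] = set()
--     pending_delta_ids = [start_delta_id]
--     while pending_delta_ids:
--         delta_id = pending_delta_ids.pop()
--         if delta_id in component_delta_ids:
--             continue
--         component_delta_ids.add(delta_id)
--         pending_delta_ids.extend(sorted(adjacency.get(delta_id, set()) - component_delta_ids))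
--     return sorted(component_delta_ids)
-- ===== SOURCE B (Python) =====
-- def _walk_delta_component(adjacency, start_delta_id):
--     # Frontier-set BFS: expand whole levels with set unions instead of a
--     # per-node stack with inner sorts; result is the sorted component either way.
--     visited = {start_delta_id}
--     frontier = {start_delta_id}
--     while frontier:
--         reachable = set()
--         for node in frontier:
--             reachable |= adjacency.get(node, set())
--         frontier = reachable - visited
--         visited |= frontier
--     return sorted(visited)
-- ===== Notes on version B (the rewrite author's own statement) =====
-- stated objective: alternative
-- what changed: Replaced the explicit pending-list stack (pop one node, re-check visited, push each node's sorted unvisited neighbours) by a frontier-set BFS that expands a whole level at a time with set unions and one set difference, sorting only once at the end; the component set is identical, so the final sorted output is too.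
import Mathlib
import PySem

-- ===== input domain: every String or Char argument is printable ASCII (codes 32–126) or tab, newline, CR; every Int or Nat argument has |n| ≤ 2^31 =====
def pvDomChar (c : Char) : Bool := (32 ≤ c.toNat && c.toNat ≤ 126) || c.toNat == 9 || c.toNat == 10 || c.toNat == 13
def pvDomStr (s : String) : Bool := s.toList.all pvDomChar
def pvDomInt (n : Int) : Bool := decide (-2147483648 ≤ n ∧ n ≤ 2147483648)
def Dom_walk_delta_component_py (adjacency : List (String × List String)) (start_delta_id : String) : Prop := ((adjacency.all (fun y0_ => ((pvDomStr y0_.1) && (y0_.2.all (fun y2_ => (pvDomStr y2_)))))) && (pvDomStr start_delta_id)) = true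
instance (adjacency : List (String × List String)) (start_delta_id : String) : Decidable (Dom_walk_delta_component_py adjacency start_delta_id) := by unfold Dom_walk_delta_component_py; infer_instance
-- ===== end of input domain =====

-- B replaces A's pending-list stack (with per-node sorted pushes) by a frontier-set
-- BFS expanding a whole level per iteration with set unions; same sorted component.

-- ===== PORT A =====
-- adjacency.get(node, set())  (first-match association-list lookup)
def pvNbrs (adjacency : List (String × List String)) (node : String) : List String :=
  (PySem.Dict.mk adjacency).getD node []

-- all strings that can ever be pushed/visited besides the start (termination only)
def pvCand (adjacency : List (String × List String)) : List String :=
  adjacency.flatMap (fun p => p.2)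

lemma pvNbrs_cons (p : String × List String) (rest : List (String × List String)) (x : String) :
    pvNbrs (p :: rest) x = if p.1 == x then p.2 else pvNbrs rest x := by
  obtain ⟨k, v⟩ := p
  simp [pvNbrs, PySem.Dict.getD_eq_get?_getD, PySem.Dict.get?_mk_cons]
  split <;> simp

lemma pv_nbrs_subset_cand (adjacency : List (String × List String)) (x y : String)
    (hy : y ∈ pvNbrs adjacency x) : y ∈ pvCand adjacency := by
  induction adjacency with
  | nil => cases hy
  | cons p rest ih =>
    rw [pvNbrs_cons] at hy
    by_cases hk : p.1 == x
    · rw [if_pos hk] at hy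
      exact List.mem_flatMap.2 ⟨p, List.mem_cons_self, hy⟩
    · rw [if_neg hk] at hy
      rcases List.mem_flatMap.1 (ih hy) with ⟨q, hq, hyq⟩
      exact List.mem_flatMap.2 ⟨q, List.mem_cons_of_mem _ hq, hyq⟩

lemma pv_filter_length_le {α : Type} [DecidableEq α] (cand v v' : List α)
    (hsub : ∀ a ∈ v, a ∈ v') :
    (cand.filter (fun a => !decide (a ∈ v'))).length ≤ (cand.filter (fun a => !decide (a ∈ v))).length := by
  induction cand with
  | nil => simp
  | cons a t ih =>
    by_cases ha' : a ∈ v'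
    · by_cases ha : a ∈ v <;> simp [ha, ha'] <;> omega
    · have ha : a ∉ v := fun h => ha' (hsub a h)
      simp [ha, ha']; omega

lemma pv_filter_length_lt {α : Type} [DecidableEq α] (cand v v' : List α)
    (hsub : ∀ a ∈ v, a ∈ v') (x : α) (hx : x ∈ cand) (hxv : x ∉ v) (hxv' : x ∈ v') :
    (cand.filter (fun a => !decide (a ∈ v'))).length < (cand.filter (fun a => !decide (a ∈ v))).length := by
  induction cand with
  | nil => cases hx
  | cons a t ih =>
    rcases List.mem_cons.1 hx with rfl | hxt
    · have hle := pv_filter_length_le t v v' hsub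
      simp [hxv, hxv']; omega
    · have := ih hxt
      by_cases ha' : a ∈ v'
      · by_cases ha : a ∈ v <;> simp [ha, ha'] <;> omega
      · have ha : a ∉ v := fun h => ha' (hsub a h)
        simp [ha, ha']; omega

def walkA (adjacency : List (String × List String)) (start : String)
    (visited pending : List String)
    (hp : ∀ x ∈ pending, x ∈ start :: pvCand adjacency) : List String :=
  if h : pending = [] then
    PySem.List.sorted visited (fun x => x) false  -- return sorted(component_delta_ids)
  else if hd : pending.getLast h ∈ visited then
    walkA adjacency start visited pending.dropLast
      (fun x hx => hp x ((List.dropLast_sublist pending).subset hx))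
  else
    walkA adjacency start (PySem.Set.add visited (pending.getLast h))
      (pending.dropLast ++ PySem.List.sorted
        (PySem.Set.diff (pvNbrs adjacency (pending.getLast h))
          (PySem.Set.add visited (pending.getLast h))) (fun x => x) false)
      (fun x hx => by
        rcases List.mem_append.1 hx with h1 | h2
        · exact hp x ((List.dropLast_sublist pending).subset h1)
        · have h3 := (PySem.List.mem_sorted ..).1 h2
          have h4 := (PySem.Set.mem_diff ..).1 h3
          exact List.mem_cons_of_mem _ (pv_nbrs_subset_cand adjacency _ x h4.1))
termination_by (((start :: pvCand adjacency).filter (fun a => !decide (a ∈ visited))).length, pending.length)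
decreasing_by
  · apply Prod.Lex.right
    have : pending.length ≠ 0 := fun h0 => h (List.length_eq_zero_iff.1 h0)
    simp [List.length_dropLast]; omega
  · apply Prod.Lex.left
    exact pv_filter_length_lt _ _ _
      (fun a ha => (PySem.Set.mem_add ..).2 (Or.inl ha))
      (pending.getLast h) (hp _ (List.getLast_mem h)) hd
      ((PySem.Set.mem_add ..).2 (Or.inr rfl))

def walk_delta_component_py (adjacency : List (String × List String)) (start_delta_id : String) : List String :=
  walkA adjacency start_delta_id [] [start_delta_id]
    (fun x hx => by simp at hx; simp [hx])

-- ===== PORT B =====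
-- reachable = set(); for node in frontier: reachable |= adjacency.get(node, set())
def pvLevel (adjacency : List (String × List String)) (frontier : List String) : List String :=
  frontier.foldl (fun acc node => PySem.Set.update acc (pvNbrs adjacency node)) PySem.Set.empty

lemma pv_foldl_update_subset_cand (adjacency : List (String × List String)) (frontier : List String) :
    ∀ acc : List String, (∀ y ∈ acc, y ∈ pvCand adjacency) →
    ∀ y ∈ frontier.foldl (fun acc node => PySem.Set.update acc (pvNbrs adjacency node)) acc,
      y ∈ pvCand adjacency := by
  induction frontier with
  | nil => intro acc hacc y hy; exact hacc y hy
  | cons n t ih =>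
    intro acc hacc y hy
    refine ih _ ?_ y hy
    intro z hz
    rcases (PySem.Set.mem_update ..).1 hz with h1 | h2
    · exact hacc z h1
    · exact pv_nbrs_subset_cand adjacency n z h2

lemma pv_level_subset_cand (adjacency : List (String × List String)) (frontier : List String) :
    ∀ y ∈ pvLevel adjacency frontier, y ∈ pvCand adjacency :=
  pv_foldl_update_subset_cand adjacency frontier PySem.Set.empty (by intro y hy; cases hy)

def walkB (adjacency : List (String × List String)) (visited frontier : List String) : List String :=
  if _h : frontier = [] then
    PySem.List.sorted visited (fun x => x) false
  else
    walkB adjacency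
      (PySem.Set.union visited (PySem.Set.diff (pvLevel adjacency frontier) visited))
      (PySem.Set.diff (pvLevel adjacency frontier) visited)
termination_by (((pvCand adjacency).filter (fun a => !decide (a ∈ visited))).length, frontier.length)
decreasing_by
  by_cases hfe : PySem.Set.diff (pvLevel adjacency frontier) visited = []
  · rw [hfe]
    have hu : PySem.Set.union visited ([] : List String) = visited := rfl
    rw [hu]
    apply Prod.Lex.right
    simpa using List.length_pos_of_ne_nil _h
  · obtain ⟨x, hx⟩ := List.exists_mem_of_ne_nil _ hfe
    have hx' := (PySem.Set.mem_diff ..).1 hx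
    apply Prod.Lex.left
    exact pv_filter_length_lt _ _ _
      (fun a ha => (PySem.Set.mem_union ..).2 (Or.inl ha))
      x (pv_level_subset_cand adjacency frontier x hx'.1)
      hx'.2 ((PySem.Set.mem_union ..).2 (Or.inr hx))

def walk_delta_component_py_alt (adjacency : List (String × List String)) (start_delta_id : String) : List String :=
  walkB adjacency [start_delta_id] [start_delta_id]

-- ===== PRECONDITION & SPEC =====
def Spec_walk_delta_component_py (adjacency : List (String × List String)) (start_delta_id : String) (out : List String) : Prop := out = walk_delta_component_py_alt adjacency start_delta_id
instance (adjacency : List (String × List String)) (start_delta_id : String) (out : List String) : Decidable (Spec_walk_delta_component_py adjacency start_delta_id out) := by unfold Spec_walk_delta_component_py; infer_instance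

-- ===== CLAIM (what is proved, stated in full; the proofs are below) =====
def Claim_equal_walk_delta_component_py : Prop := ∀ (adjacency : List (String × List String)) (start_delta_id : String), Dom_walk_delta_component_py adjacency start_delta_id → Spec_walk_delta_component_py adjacency start_delta_id (walk_delta_component_py adjacency start_delta_id)

-- ===== LEMMAS AND PROOFS =====
def pvEdge (adjacency : List (String × List String)) (x y : String) : Prop :=
  y ∈ pvNbrs adjacency x

def pvReach (adjacency : List (String × List String)) (s x : String) : Prop :=
  Relation.ReflTransGen (pvEdge adjacency) s x

lemma pv_mem_foldl_update (adjacency : List (String × List String)) (frontier : List String) :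
    ∀ (acc : List String) (y : String),
      y ∈ frontier.foldl (fun acc node => PySem.Set.update acc (pvNbrs adjacency node)) acc ↔
      y ∈ acc ∨ ∃ n ∈ frontier, y ∈ pvNbrs adjacency n := by
  induction frontier with
  | nil => simp
  | cons n t ih =>
    intro acc y
    simp only [List.foldl_cons, ih, PySem.Set.mem_update ..]
    constructor
    · rintro ((h1 | h1) | ⟨m, hm, h2⟩)
      · exact Or.inl h1
      · exact Or.inr ⟨n, List.mem_cons_self, h1⟩
      · exact Or.inr ⟨m, List.mem_cons_of_mem _ hm, h2⟩
    · rintro (h1 | ⟨m, hm, h2⟩)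
      · exact Or.inl (Or.inl h1)
      · rcases List.mem_cons.1 hm with rfl | hm'
        · exact Or.inl (Or.inr h2)
        · exact Or.inr ⟨m, hm', h2⟩

lemma pv_mem_level (adjacency : List (String × List String)) (frontier : List String) (y : String) :
    y ∈ pvLevel adjacency frontier ↔ ∃ n ∈ frontier, y ∈ pvNbrs adjacency n := by
  rw [pvLevel, pv_mem_foldl_update]
  simp [PySem.Set.empty]

lemma walkA_reach (adjacency : List (String × List String)) (start : String) :
    ∀ (visited pending : List String) (hp : ∀ x ∈ pending, x ∈ start :: pvCand adjacency),
    visited.Nodup →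
    (∀ x ∈ visited, pvReach adjacency start x) →
    (∀ x ∈ pending, pvReach adjacency start x) →
    (∀ x ∈ visited, ∀ y, pvEdge adjacency x y → y ∈ visited ∨ y ∈ pending) →
    (start ∈ visited ∨ start ∈ pending) →
    ∃ V, walkA adjacency start visited pending hp = PySem.List.sorted V (fun x => x) false ∧
      V.Nodup ∧ ∀ x, x ∈ V ↔ pvReach adjacency start x := by
  intro visited pending hp
  fun_induction walkA adjacency start visited pending hp with
  | case1 visited hp =>
    intro hnd hsv _ hcl hst
    refine ⟨visited, rfl, hnd, fun x => ⟨fun hx => hsv x hx, fun hr => ?_⟩⟩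
    induction hr with
    | refl => exact hst.resolve_right (by simp)
    | tail hab e ih => exact (hcl _ ih _ e).resolve_right (by simp)
  | case2 visited pending hp h hd ih =>
    intro hnd hsv hsp hcl hst
    have hpe : pending.dropLast ++ [pending.getLast h] = pending := List.dropLast_append_getLast h
    have hmem : ∀ y, y ∈ pending → y ∈ pending.dropLast ∨ y = pending.getLast h := by
      intro y hy
      rw [← hpe] at hy
      simpa using hy
    refine ih hnd hsv (fun x hx => hsp x ((List.dropLast_sublist pending).subset hx)) ?_ ?_
    · intro x hx y e
      rcases hcl x hx y e with h1 | h1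
      · exact Or.inl h1
      · rcases hmem y h1 with h2 | h2
        · exact Or.inr h2
        · exact Or.inl (h2 ▸ hd)
    · rcases hst with h1 | h1
      · exact Or.inl h1
      · rcases hmem start h1 with h2 | h2
        · exact Or.inr h2
        · exact Or.inl (h2 ▸ hd)
  | case3 visited pending hp h hd ih =>
    intro hnd hsv hsp hcl hst
    have hpe : pending.dropLast ++ [pending.getLast h] = pending := List.dropLast_append_getLast h
    have hmem : ∀ y, y ∈ pending → y ∈ pending.dropLast ∨ y = pending.getLast h := by
      intro y hy
      rw [← hpe] at hy
      simpa using hy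
    have hlast : pvReach adjacency start (pending.getLast h) := hsp _ (List.getLast_mem h)
    have hmadd : ∀ y, y ∈ PySem.Set.add visited (pending.getLast h) ↔
        y ∈ visited ∨ y = pending.getLast h := fun y => PySem.Set.mem_add ..
    refine ih (PySem.Set.nodup_add _ _ hnd) ?_ ?_ ?_ ?_
    · intro x hx
      rcases (hmadd x).1 hx with h1 | h1
      · exact hsv x h1
      · exact h1 ▸ hlast
    · intro x hx
      rcases List.mem_append.1 hx with h1 | h1
      · exact hsp x ((List.dropLast_sublist pending).subset h1)
      · have h2 := (PySem.Set.mem_diff ..).1 ((PySem.List.mem_sorted ..).1 h1)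
        exact Relation.ReflTransGen.tail hlast h2.1
    · intro x hx y e
      rcases (hmadd x).1 hx with h1 | h1
      · rcases hcl x h1 y e with h2 | h2
        · exact Or.inl ((hmadd y).2 (Or.inl h2))
        · rcases hmem y h2 with h3 | h3
          · exact Or.inr (List.mem_append.2 (Or.inl h3))
          · exact Or.inl ((hmadd y).2 (Or.inr h3))
      · subst h1
        by_cases hy : y ∈ PySem.Set.add visited (pending.getLast h)
        · exact Or.inl hy
        · refine Or.inr (List.mem_append.2 (Or.inr ?_))
          exact (PySem.List.mem_sorted ..).2 ((PySem.Set.mem_diff ..).2 ⟨e, hy⟩)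
    · rcases hst with h1 | h1
      · exact Or.inl ((hmadd start).2 (Or.inl h1))
      · rcases hmem start h1 with h2 | h2
        · exact Or.inr (List.mem_append.2 (Or.inl h2))
        · exact Or.inl ((hmadd start).2 (Or.inr h2))

lemma walkB_reach (adjacency : List (String × List String)) (start : String) :
    ∀ (visited frontier : List String),
    visited.Nodup →
    (∀ x ∈ frontier, x ∈ visited) →
    (∀ x ∈ visited, pvReach adjacency start x) →
    (∀ x ∈ visited, x ∉ frontier → ∀ y, pvEdge adjacency x y → y ∈ visited) →
    start ∈ visited →
    ∃ V, walkB adjacency visited frontier = PySem.List.sorted V (fun x => x) false ∧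
      V.Nodup ∧ ∀ x, x ∈ V ↔ pvReach adjacency start x := by
  intro visited frontier
  fun_induction walkB adjacency visited frontier with
  | case1 visited =>
    intro hnd _ hsv hcl hst
    refine ⟨visited, rfl, hnd, fun x => ⟨fun hx => hsv x hx, fun hr => ?_⟩⟩
    induction hr with
    | refl => exact hst
    | tail hab e ih => exact hcl _ ih (by simp) _ e
  | case2 visited frontier h ih =>
    intro hnd hfs hsv hcl hst
    have hmU : ∀ y, y ∈ PySem.Set.union visited (PySem.Set.diff (pvLevel adjacency frontier) visited) ↔
        y ∈ visited ∨ y ∈ PySem.Set.diff (pvLevel adjacency frontier) visited :=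
      fun y => PySem.Set.mem_union ..
    have hmD : ∀ y, y ∈ PySem.Set.diff (pvLevel adjacency frontier) visited ↔
        y ∈ pvLevel adjacency frontier ∧ y ∉ visited := fun y => PySem.Set.mem_diff ..
    refine ih (PySem.Set.nodup_union _ _ hnd) (fun x hx => (hmU x).2 (Or.inr hx)) ?_ ?_
      ((hmU start).2 (Or.inl hst))
    · intro x hx
      rcases (hmU x).1 hx with h1 | h1
      · exact hsv x h1
      · obtain ⟨n, hn, he⟩ := (pv_mem_level adjacency frontier x).1 ((hmD x).1 h1).1
        exact Relation.ReflTransGen.tail (hsv n (hfs n hn)) he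
    · intro x hx hnf y e
      rcases (hmU x).1 hx with h1 | h1
      · by_cases hxf : x ∈ frontier
        · have hyl : y ∈ pvLevel adjacency frontier :=
            (pv_mem_level adjacency frontier y).2 ⟨x, hxf, e⟩
          by_cases hyv : y ∈ visited
          · exact (hmU y).2 (Or.inl hyv)
          · exact (hmU y).2 (Or.inr ((hmD y).2 ⟨hyl, hyv⟩))
        · exact (hmU y).2 (Or.inl (hcl x h1 hxf y e))
      · exact absurd h1 hnf

-- ===== VERDICT (by name: the statement is the Claim_ definition above) =====
theorem walk_delta_component_py_spec : Claim_equal_walk_delta_component_py := by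
  intro adjacency start _
  obtain ⟨VA, eA, ndA, mA⟩ := walkA_reach adjacency start [] [start]
    (fun x hx => by simp at hx; simp [hx])
    (by simp) (by simp)
    (by intro x hx; simp at hx; subst hx; exact Relation.ReflTransGen.refl)
    (by simp) (by simp)
  obtain ⟨VB, eB, ndB, mB⟩ := walkB_reach adjacency start [start] [start]
    (by simp) (by simp)
    (by intro x hx; simp at hx; subst hx; exact Relation.ReflTransGen.refl)
    (by intro x hx hnx; simp at hx; simp [hx] at hnx)
    (by simp)
  have hperm : VA.Perm VB :=
    (List.perm_ext_iff_of_nodup ndA ndB).2 (fun x => (mA x).trans (mB x).symm)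
  have hs : PySem.List.sorted VA (fun x => x) false = PySem.List.sorted VB (fun x => x) false :=
    PySem.List.sorted_eq_sorted_of_perm VA VB (fun x => x) (fun a b hab => hab) hperm
  show walk_delta_component_py adjacency start = walk_delta_component_py_alt adjacency start
  unfold walk_delta_component_py walk_delta_component_py_alt
  exact eA.trans (hs.trans eB.symm)
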